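-- pv_equiv track=rewrite | github.com/fuchsberger/csci203 | 02-11-return-tupes/exercise3.py | zero_count_sorted2
-- ===== SOURCE A (Python) =====
-- def zero_count_sorted2(sorted_numbers): # TODO
--     step = 0
--     total = 0
--
--     for number in sorted_numbers:
--         step = step + 1
--
--         if number > 0:
--             return total, step
--
--         if number == 0:
--             total = total + 1
--
--     return total, step
-- ===== SOURCE B (Python) =====
-- from itertools import takewhile
--
-- def zero_count_sorted2(sorted_numbers):
--     prefix = list(takewhile(lambda x: not (x > 0), sorted_numbers))
--     total = prefix.count(0)
--     step = len(prefix) if len(prefix) == len(sorted_numbers) else len(prefix) + 1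
--     return total, step
-- ===== Notes on version B (the rewrite author's own statement) =====
-- stated objective: alternative
-- what changed: Replaces A's fused accumulator loop (early return on the first positive) with a takewhile that builds the non-positive prefix, a separate count(0) pass over it, and step computed arithmetically from the prefix length.
import Mathlib
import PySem

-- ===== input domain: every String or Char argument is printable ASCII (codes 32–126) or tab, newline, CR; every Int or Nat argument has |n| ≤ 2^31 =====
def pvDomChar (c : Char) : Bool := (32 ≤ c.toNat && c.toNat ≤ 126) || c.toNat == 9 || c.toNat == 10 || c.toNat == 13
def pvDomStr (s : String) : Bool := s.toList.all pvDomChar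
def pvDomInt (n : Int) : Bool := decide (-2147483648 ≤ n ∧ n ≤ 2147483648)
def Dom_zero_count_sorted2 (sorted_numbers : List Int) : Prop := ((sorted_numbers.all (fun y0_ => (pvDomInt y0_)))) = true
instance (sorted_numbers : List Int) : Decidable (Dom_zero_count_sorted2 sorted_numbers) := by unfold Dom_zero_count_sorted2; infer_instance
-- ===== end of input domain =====

-- ===== PORT A =====
-- A: fused loop, step/total accumulators, early return at the first positive element.
def zeroCountLoopA : List Int → Int → Int → Int × Int
  | [], step, total => (total, step)
  | number :: rest, step, total =>
    let step := step + 1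
    if number > 0 then (total, step)
    else zeroCountLoopA rest step (if number = 0 then total + 1 else total)

def zero_count_sorted2 (sorted_numbers : List Int) : Int × Int :=
  zeroCountLoopA sorted_numbers 0 0

-- ===== PORT B =====
-- B: takewhile prefix of non-positives, then count(0) and length arithmetic.
def zero_count_sorted2_alt (sorted_numbers : List Int) : Int × Int :=
  let pre := sorted_numbers.takeWhile (fun x => !(decide (x > 0)))
  let total : Int := pre.count 0
  let step : Int := if pre.length == sorted_numbers.length then pre.length else pre.length + 1
  (total, step)

-- ===== PRECONDITION & SPEC =====
def Spec_zero_count_sorted2 (sorted_numbers : List Int) (out : Int × Int) : Prop := out = zero_count_sorted2_alt sorted_numbers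
instance (sorted_numbers : List Int) (out : Int × Int) : Decidable (Spec_zero_count_sorted2 sorted_numbers out) := by unfold Spec_zero_count_sorted2; infer_instance

-- ===== CLAIM (what is proved, stated in full; the proofs are below) =====
def Claim_equal_zero_count_sorted2 : Prop := ∀ (sorted_numbers : List Int), Dom_zero_count_sorted2 sorted_numbers → Spec_zero_count_sorted2 sorted_numbers (zero_count_sorted2 sorted_numbers)

-- ===== LEMMAS AND PROOFS =====

-- ===== VERDICT (by name: the statement is the Claim_ definition above) =====
theorem zeroCountLoopA_eq (xs : List Int) : ∀ step total : Int,
    zeroCountLoopA xs step total =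
      (total + ((xs.takeWhile (fun x => !(decide (x > 0)))).count 0 : Int),
       step + (if (xs.takeWhile (fun x => !(decide (x > 0)))).length = xs.length
               then ((xs.takeWhile (fun x => !(decide (x > 0)))).length : Int)
               else ((xs.takeWhile (fun x => !(decide (x > 0)))).length : Int) + 1)) := by
  induction xs with
  | nil => intro step total; simp [zeroCountLoopA]
  | cons n rest ih =>
    intro step total
    by_cases hpos : n > 0
    · simp [zeroCountLoopA, hpos, List.takeWhile]
    · by_cases hz : n = 0
      · simp [zeroCountLoopA, hz, List.takeWhile, ih]
        split_ifs <;> omega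
      · simp [zeroCountLoopA, hpos, hz, List.takeWhile, ih]
        split_ifs <;> omega

theorem zero_count_sorted2_spec : Claim_equal_zero_count_sorted2 := by
  intro xs _
  unfold Spec_zero_count_sorted2 zero_count_sorted2 zero_count_sorted2_alt
  rw [zeroCountLoopA_eq]
  simp [beq_iff_eq]
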